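-- pv_equiv track=rewrite | github.com/ericzhang98/competitive | codejam/2022/round1a/a.py | solution
-- ===== SOURCE A (Python) =====
-- def solution(s):
--     highlight = set()
--     for i in range(len(s)):
--         for j in range(i+1,len(s)):
--             if s[i] < s[j]:
--                 highlight.add(i)
--                 break
--             if s[i] > s[j]:
--                 break
--     res = []
--     for i, c in enumerate(list(s)):
--         res.append(c)
--         if i in highlight:
--             res.append(c)
--     return "".join(res)
-- ===== SOURCE B (Python) =====
-- def solution(s):
--     # One right-to-left pass: a char is doubled iff the next differing char
--     # to its right is larger; across equal runs the decision propagates.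
--     n = len(s)
--     parts = []
--     dbl = False
--     for i in range(n - 1, -1, -1):
--         c = s[i]
--         if i + 1 < n:
--             d = s[i + 1]
--             dbl = c < d or (c == d and dbl)
--         else:
--             dbl = False
--         parts.append(c + c if dbl else c)
--     parts.reverse()
--     return "".join(parts)
-- ===== Notes on version B (the rewrite author's own statement) =====
-- stated objective: faster
-- what changed: Replaced the quadratic forward scan (for each i, scan right until the first differing char) plus a highlight set by a single right-to-left pass that propagates the doubling decision across equal runs.
import Mathlib
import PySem

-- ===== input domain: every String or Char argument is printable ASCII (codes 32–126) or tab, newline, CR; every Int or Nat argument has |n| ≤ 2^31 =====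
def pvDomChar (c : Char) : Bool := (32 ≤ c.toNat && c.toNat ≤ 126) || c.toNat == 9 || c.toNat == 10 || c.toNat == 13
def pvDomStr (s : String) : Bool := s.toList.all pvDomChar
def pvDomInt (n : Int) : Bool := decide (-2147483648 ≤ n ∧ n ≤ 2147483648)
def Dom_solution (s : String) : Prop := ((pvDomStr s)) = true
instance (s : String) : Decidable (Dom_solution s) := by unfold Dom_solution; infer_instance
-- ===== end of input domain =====

-- B replaces A's quadratic per-index forward scan by a single right-to-left pass
-- that propagates the doubling decision across runs of equal characters (faster).


-- ===== PORT A =====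
-- inner loop 'for j in range(i+1, len(s)): …break…' over the suffix to the right of i
def aInner (c : Char) : List Char → Bool
  | [] => false
  | x :: xs => if c < x then true else if c > x then false else aInner c xs

def aHighlight (l : List Char) : PySem.Set Int :=
  (PySem.List.pyRange 0 (l.length : Int) 1).foldl
    (fun h i =>
      if aInner (PySem.List.pyGetD l i ' ') (l.drop (i + 1).toNat) then PySem.Set.add h i else h)
    PySem.Set.empty

def solution (s : String) : String :=
  let l := s.toList
  let highlight := aHighlight l
  let res := (PySem.List.enumerate l 0).foldl
    (fun r p =>
      let r1 := r ++ [p.2]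
      if PySem.Set.contains highlight p.1 then r1 ++ [p.2] else r1) []
  String.mk res

-- ===== PORT B =====
-- right-to-left pass of Source B as structural recursion: returns (dbl flag at the head, rendered suffix)
def altAux : List Char → Bool × List Char
  | [] => (false, [])
  | c :: rest =>
    let prev := altAux rest
    let dbl := match rest with
      | [] => false
      | d :: _ => decide (c < d) || (c == d && prev.1)
    (dbl, (if dbl then [c, c] else [c]) ++ prev.2)

def solution_alt (s : String) : String := String.mk (altAux s.toList).2

-- ===== PRECONDITION & SPEC =====
def Spec_solution (s : String) (out : String) : Prop := out = solution_alt s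
instance (s : String) (out : String) : Decidable (Spec_solution s out) := by unfold Spec_solution; infer_instance

-- ===== CLAIM (what is proved, stated in full; the proofs are below) =====
def Claim_equal_solution : Prop := ∀ (s : String), Dom_solution s → Spec_solution s (solution s)

-- ===== LEMMAS AND PROOFS =====

theorem mem_foldl_addIf (p : Int → Bool) (js : List Int) (h : PySem.Set Int) (i : Int) :
    i ∈ js.foldl (fun h j => if p j then PySem.Set.add h j else h) h ↔
      i ∈ h ∨ (i ∈ js ∧ p i = true) := by
  induction js generalizing h with
  | nil => simp
  | cons a tl ih =>
    simp only [List.foldl_cons, ih]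
    by_cases hp : p a = true
    · rw [if_pos hp]
      simp only [PySem.Set.mem_add, List.mem_cons]
      by_cases hia : i = a
      · subst hia; simp [hp]
      · simp [hia]
    · rw [if_neg hp]
      simp only [List.mem_cons]
      by_cases hia : i = a
      · subst hia; simp [hp]
      · simp [hia]

theorem mem_aHighlight (l : List Char) (i : Int) :
    i ∈ aHighlight l ↔
      0 ≤ i ∧ i < (l.length : Int) ∧
        aInner (PySem.List.pyGetD l i ' ') (l.drop (i + 1).toNat) = true := by
  unfold aHighlight
  rw [mem_foldl_addIf]
  simp [PySem.Set.empty, PySem.List.mem_pyRange_one, and_assoc]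

theorem flag_eq (r : List Char) : ∀ c : Char, (altAux (c :: r)).1 = aInner c r := by
  induction r with
  | nil => intro c; simp [altAux, aInner]
  | cons d rs ih =>
    intro c
    simp only [altAux, aInner]
    rcases lt_trichotomy c d with h | h | h
    · simp [h]
    · subst h
      have h2 := ih c
      simp only [altAux] at h2
      simp [h2]
    · have hne : (c == d) = false := by simp [ne_of_gt h]
      have hnlt : ¬ c < d := not_lt.mpr h.le
      simp [hne, hnlt, h]

theorem main_eq (l : List Char) (t : List Char) :
    ∀ (k : Nat), t = l.drop k →
      (PySem.List.enumerate t (k : Int)).flatMap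
          (fun p => p.2 :: (if PySem.Set.contains (aHighlight l) p.1 then [p.2] else [])) =
        (altAux t).2 := by
  induction t with
  | nil => intro k _; simp [altAux]
  | cons c r ih =>
    intro k hdrop
    have hk : k < l.length := by
      by_contra hge
      rw [List.drop_eq_nil_of_le (Nat.le_of_not_lt hge)] at hdrop
      exact List.cons_ne_nil _ _ hdrop
    have hget : l[k]? = some c := by
      rw [← List.head?_drop, ← hdrop]; rfl
    have hdrop1 : r = l.drop (k + 1) := by
      have : l.drop (k + 1) = (l.drop k).drop 1 := by
        rw [List.drop_drop, Nat.add_comm]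
      rw [this, ← hdrop]; rfl
    have hcont : PySem.Set.contains (aHighlight l) (k : Int) = aInner c r := by
      have hGetD : PySem.List.pyGetD l (k : Int) ' ' = c := by
        rw [PySem.List.pyGetD_natCast]
        simp [List.getD, hget]
      have htn : (((k : Int)) + 1).toNat = k + 1 := by omega
      by_cases hA : aInner c r = true
      · rw [hA]
        rw [(PySem.Set.contains_iff _ _).2 ?_]
        rw [mem_aHighlight]
        refine ⟨by exact_mod_cast Nat.zero_le k, by exact_mod_cast hk, ?_⟩
        rw [hGetD, htn, ← hdrop1]; exact hA
      · have : ¬ ((k : Int) ∈ aHighlight l) := by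
          rw [mem_aHighlight]
          rintro ⟨-, -, hbad⟩
          rw [hGetD, htn, ← hdrop1] at hbad
          exact hA hbad
        simp only [Bool.not_eq_true] at hA
        rw [hA]
        by_contra hc
        simp only [Bool.not_eq_false] at hc
        exact this ((PySem.Set.contains_iff _ _).1 hc)
    rw [PySem.List.enumerate_cons, List.flatMap_cons]
    have hkc : (k : Int) + 1 = ((k + 1 : Nat) : Int) := by push_cast; ring
    rw [hkc, ih (k + 1) hdrop1]
    show (c :: (if PySem.Set.contains (aHighlight l) (k : Int) then [c] else [])) ++ (altAux r).2
        = (altAux (c :: r)).2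
    rw [hcont]
    cases hA : aInner c r with
    | false =>
      simp only [altAux]
      rw [← flag_eq r c] at hA
      simp only [altAux] at hA
      simp [hA]
    | true =>
      simp only [altAux]
      rw [← flag_eq r c] at hA
      simp only [altAux] at hA
      simp [hA]

-- ===== VERDICT (by name: the statement is the Claim_ definition above) =====
theorem resList (l : List Char) :
    (PySem.List.enumerate l 0).foldl
        (fun r p =>
          let r1 := r ++ [p.2]
          if PySem.Set.contains (aHighlight l) p.1 then r1 ++ [p.2] else r1) [] =
      (altAux l).2 := by
  have hbody :
      (fun (r : List Char) (p : Int × Char) =>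
          let r1 := r ++ [p.2]
          if PySem.Set.contains (aHighlight l) p.1 then r1 ++ [p.2] else r1) =
        fun r p =>
          r ++ (p.2 :: (if PySem.Set.contains (aHighlight l) p.1 then [p.2] else [])) := by
    funext r p
    by_cases hc : PySem.Set.contains (aHighlight l) p.1 = true
    · rw [if_pos hc, if_pos hc]; simp
    · rw [if_neg hc, if_neg hc]
  rw [hbody, PySem.List.foldl_append_eq_flatMap, List.nil_append]
  exact main_eq l l 0 rfl

theorem solution_spec : Claim_equal_solution := by
  intro s _
  show solution s = solution_alt s
  exact congrArg String.mk (resList s.toList)
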